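-- pv_equiv track=rewrite | github.com/miliar/Code_Jam_Webscraper | solutions_python/Problem_209/653.py | calc
-- ===== SOURCE A (Python) =====
-- def calc(x):
-- 	sum = 0
-- 	for c,i in enumerate(x):
-- 		if (c==0):
-- 			sum+= i[-1]
-- 		else:
-- 			sum+= i[0]**2 - x[c-1][0]**2 + 2*i[0]*i[1]
-- 	return sum
-- ===== SOURCE B (Python) =====
-- def calc(x):
--     if not x:
--         return 0
--     total = x[0][-1] + x[-1][0] ** 2 - x[0][0] ** 2
--     for i in x[1:]:
--         total += 2 * i[0] * i[1]
--     return total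
-- ===== Notes on version B (the rewrite author's own statement) =====
-- stated objective: alternative
-- what changed: B telescopes the i[0]**2 - x[c-1][0]**2 terms into a single endpoint expression x[-1][0]**2 - x[0][0]**2 computed up front, so the loop only accumulates the 2*i[0]*i[1] cross terms and never looks back at the previous element.
import Mathlib
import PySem

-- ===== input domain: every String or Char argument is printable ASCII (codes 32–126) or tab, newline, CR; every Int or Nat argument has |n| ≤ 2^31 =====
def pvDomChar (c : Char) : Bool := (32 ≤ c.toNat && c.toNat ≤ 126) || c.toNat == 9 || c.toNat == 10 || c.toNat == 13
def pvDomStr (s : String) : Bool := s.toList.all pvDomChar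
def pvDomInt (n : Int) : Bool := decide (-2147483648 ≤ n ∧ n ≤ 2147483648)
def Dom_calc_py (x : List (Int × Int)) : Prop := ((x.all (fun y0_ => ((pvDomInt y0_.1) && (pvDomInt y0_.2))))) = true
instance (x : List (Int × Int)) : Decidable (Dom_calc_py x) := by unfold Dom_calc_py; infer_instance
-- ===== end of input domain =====

-- B replaces the per-step telescoping subtraction by a single endpoint expression plus a loop over
-- only the cross terms (alternative decomposition; same O(n) cost, return value proved identical).

-- ===== PORT A =====
-- for c,i in enumerate(x): if c==0: sum += i[-1] else: sum += i[0]**2 - x[c-1][0]**2 + 2*i[0]*i[1]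
-- (x[c-1] is always in range when the else branch runs, so the .getD default is never used)
def calc_py (x : List (Int × Int)) : Int :=
  (PySem.List.enumerate x).foldl
    (fun s ci =>
      if ci.1 = 0 then s + ci.2.2
      else s + ci.2.1 ^ 2 - ((PySem.List.pyGet? x (ci.1 - 1)).getD (0, 0)).1 ^ 2
              + 2 * ci.2.1 * ci.2.2) 0

-- ===== PORT B =====
-- if not x: return 0; total = x[0][-1] + x[-1][0]**2 - x[0][0]**2; for i in x[1:]: total += 2*i[0]*i[1]
def calc_py_alt (x : List (Int × Int)) : Int :=
  match x with
  | [] => 0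
  | a :: l =>
    l.foldl (fun t i => t + 2 * i.1 * i.2)
      (a.2 + ((a :: l).getLast (by simp)).1 ^ 2 - a.1 ^ 2)

-- ===== PRECONDITION & SPEC =====
def Spec_calc_py (x : List (Int × Int)) (out : Int) : Prop := out = calc_py_alt x
instance (x : List (Int × Int)) (out : Int) : Decidable (Spec_calc_py x out) := by unfold Spec_calc_py; infer_instance

-- ===== CLAIM (what is proved, stated in full; the proofs are below) =====
def Claim_equal_calc_py : Prop := ∀ (x : List (Int × Int)), Dom_calc_py x → Spec_calc_py x (calc_py x)

-- ===== LEMMAS AND PROOFS =====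

-- B's cross-term fold with a general initial accumulator splits off the accumulator.
theorem cross_fold_shift (l : List (Int × Int)) (t : Int) :
    l.foldl (fun t i => t + 2 * i.1 * i.2) t
      = t + l.foldl (fun t i => t + 2 * i.1 * i.2) 0 := by
  induction l generalizing t with
  | nil => simp
  | cons b l ih => simp only [List.foldl_cons]; rw [ih, ih (0 + 2 * b.1 * b.2)]; ring

-- Invariant for A's loop from index k+1 on: if x.drop k = prev :: l, the remaining fold
-- telescopes to the endpoint difference plus the cross terms of l.
theorem calcA_tail (l : List (Int × Int)) :
    ∀ (x : List (Int × Int)) (k : Nat) (prev : Int × Int) (s : Int),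
    x.drop k = prev :: l →
    (PySem.List.enumerate l ((k : Int) + 1)).foldl
      (fun s ci =>
        if ci.1 = 0 then s + ci.2.2
        else s + ci.2.1 ^ 2 - ((PySem.List.pyGet? x (ci.1 - 1)).getD (0, 0)).1 ^ 2
                + 2 * ci.2.1 * ci.2.2) s
      = s + ((prev :: l).getLast (by simp)).1 ^ 2 - prev.1 ^ 2
          + l.foldl (fun t i => t + 2 * i.1 * i.2) 0 := by
  induction l with
  | nil =>
    intro x k prev s h
    simp [PySem.List.enumerate_nil]
  | cons b l ih =>
    intro x k prev s h
    have hget : x[k]? = some prev := by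
      rw [← List.head?_drop, h]; rfl
    have hne : ((k : Int) + 1) ≠ 0 := by omega
    have hstep : PySem.List.pyGet? x ((k : Int) + 1 - 1) = some prev := by
      have he : (k : Int) + 1 - 1 = (k : Int) := by ring
      rw [he, PySem.List.pyGet?_natCast, hget]
    have hdrop : x.drop (k + 1) = b :: l := by
      have h2 := congrArg List.tail h
      rwa [List.tail_drop] at h2
    rw [PySem.List.enumerate_cons, List.foldl_cons]
    simp only [if_neg hne, hstep, Option.getD_some]
    have hcast : ((k : Int) + 1) + 1 = ((k + 1 : Nat) : Int) + 1 := by push_cast; ring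
    rw [hcast, ih x (k + 1) b _ hdrop]
    have hlast : ((prev :: b :: l).getLast (by simp)) = ((b :: l).getLast (by simp)) := by
      simp [List.getLast_cons]
    rw [hlast]
    conv_rhs => rw [List.foldl_cons, cross_fold_shift l (0 + 2 * b.1 * b.2)]
    ring

-- ===== VERDICT (by name: the statement is the Claim_ definition above) =====
theorem calc_py_spec : Claim_equal_calc_py := by
  intro x _
  unfold Spec_calc_py calc_py calc_py_alt
  match x with
  | [] => simp [PySem.List.enumerate_nil]
  | a :: l =>
    rw [PySem.List.enumerate_cons, List.foldl_cons]
    simp only [reduceIte, Int.zero_add]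
    have h0 : (a :: l).drop 0 = a :: l := rfl
    have key := calcA_tail l (a :: l) 0 a a.2 h0
    simp only [Nat.cast_zero, Int.zero_add] at key
    rw [key]
    conv_rhs => rw [cross_fold_shift]
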